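-- pv_equiv track=rewrite | github.com/kenbanks-peng/skills | job-search/scripts/daily_report.py | _ordered_tracks
-- ===== SOURCE A (Python) =====
-- def _ordered_tracks(by_track: dict, spec_order: list) -> list:
--     """Spec-defined tracks first (in spec order, only if present), then any
--     extras the DB has but the spec doesn't, sorted alphabetically. ``unknown``
--     and None always sort last."""
--     seen: set = set()
--     out: list = []
--     for tid in spec_order:
--         if tid in by_track:
--             out.append(tid)
--             seen.add(tid)
--     extras = [
--         t for t in by_track.keys() if t not in seen and t not in ("unknown", None)
--     ]
--     out.extend(sorted(extras, key=lambda x: (x is None, x or "")))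
--     for tail in ("unknown", None):
--         if tail in by_track and tail not in out:
--             out.append(tail)
--     return out
-- ===== SOURCE B (Python) =====
-- def _ordered_tracks(by_track: dict, spec_order: list) -> list:
--     """Spec-defined tracks first (in spec order, only if present), then every
--     remaining key insertion-sorted into a tail, ranked so that ordinary tracks
--     come alphabetically first, then 'unknown', then None."""
--     out = [tid for tid in spec_order if tid in by_track]
--     seen = set(out)
--     tail = []
--     for t in by_track:
--         if t in seen:
--             continue
--         k = (2, "") if t is None else (1, t) if t == "unknown" else (0, t)
--         i = 0
--         while i < len(tail) and tail[i][0] < k: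
--             i += 1
--         tail.insert(i, (k, t))
--     return out + [t for _, t in tail]
-- ===== Notes on version B (the rewrite author's own statement) =====
-- stated objective: alternative
-- what changed: B drops A's library sort over filtered extras and the separate two-element tail loop: it builds the spec prefix by comprehension and then insertion-sorts every remaining key incrementally into a tail list under a rank key (ordinary tracks alphabetically, then 'unknown', then None), with no sorted() call and no special-casing pass.
import Mathlib
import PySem

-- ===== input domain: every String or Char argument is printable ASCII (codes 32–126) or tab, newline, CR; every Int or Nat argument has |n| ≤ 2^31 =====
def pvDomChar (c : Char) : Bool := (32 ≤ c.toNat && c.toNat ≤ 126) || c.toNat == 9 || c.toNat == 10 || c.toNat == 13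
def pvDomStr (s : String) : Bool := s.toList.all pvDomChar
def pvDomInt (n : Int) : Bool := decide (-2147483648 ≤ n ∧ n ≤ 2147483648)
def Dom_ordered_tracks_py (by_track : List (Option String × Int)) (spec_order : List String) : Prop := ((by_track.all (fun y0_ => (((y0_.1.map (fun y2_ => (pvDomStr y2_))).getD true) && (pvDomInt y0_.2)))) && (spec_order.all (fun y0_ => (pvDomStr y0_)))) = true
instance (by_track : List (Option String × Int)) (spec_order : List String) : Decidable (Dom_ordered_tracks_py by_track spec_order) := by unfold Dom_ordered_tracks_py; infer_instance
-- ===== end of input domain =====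

-- B replaces A's library sort of the filtered extras plus the two-element tail
-- loop by an incremental rank-keyed insertion sort of the remaining keys
-- (objective: alternative algorithm, same return value).

-- ===== PORT A =====
-- A's first loop over spec_order, building out and seen
def pvSpecLoop (by_track : List (Option String × Int)) (spec_order : List String) :
    List (Option String) × PySem.Set (Option String) :=
  spec_order.foldl
    (fun acc tid =>
      if some tid ∈ by_track.map Prod.fst then
        (acc.1 ++ [some tid], PySem.Set.add acc.2 (some tid))
      else acc)
    ([], PySem.Set.empty)

def ordered_tracks_py (by_track : List (Option String × Int)) (spec_order : List String) :
    List (Option String) :=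
  let st := pvSpecLoop by_track spec_order
  let extras := (PySem.List.dedup (by_track.map Prod.fst)).filter
    (fun t => !PySem.Set.contains st.2 t && !(t == some "unknown") && !(t == none))
  let out := st.1 ++ PySem.List.sorted2 extras
    (fun x => if x = none then (1 : Nat) else 0) (fun x => x.getD "")
  [some "unknown", (none : Option String)].foldl
    (fun o tail => if tail ∈ by_track.map Prod.fst ∧ tail ∉ o then o ++ [tail] else o) out

-- ===== PORT B =====
-- the rank key:  (2, "") for None, (1, t) for "unknown", (0, t) otherwise
def pvKey (t : Option String) : Nat × String :=
  match t with
  | none => (2, "")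
  | some s => if s = "unknown" then (1, s) else (0, s)

-- B's while-loop + insert: scan past smaller keys, insert (k, t) there
def pvInsertTail (tl : List ((Nat × String) × Option String)) (k : Nat × String)
    (t : Option String) : List ((Nat × String) × Option String) :=
  match tl with
  | [] => [(k, t)]
  | x :: rest => if toLex x.1 < toLex k then x :: pvInsertTail rest k t else (k, t) :: x :: rest

def ordered_tracks_py_alt (by_track : List (Option String × Int)) (spec_order : List String) :
    List (Option String) :=
  let out : List (Option String) :=
    (spec_order.filter (fun tid => some tid ∈ by_track.map Prod.fst)).map (fun tid => some tid)
  let seen := PySem.Set.ofList out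
  let tail := (PySem.List.dedup (by_track.map Prod.fst)).foldl
    (fun tl t => if PySem.Set.contains seen t then tl else pvInsertTail tl (pvKey t) t) []
  out ++ tail.map Prod.snd

-- ===== PRECONDITION & SPEC =====
def Spec_ordered_tracks_py (by_track : List (Option String × Int)) (spec_order : List String) (out : List (Option String)) : Prop := out = ordered_tracks_py_alt by_track spec_order
instance (by_track : List (Option String × Int)) (spec_order : List String) (out : List (Option String)) : Decidable (Spec_ordered_tracks_py by_track spec_order out) := by unfold Spec_ordered_tracks_py; infer_instance

-- ===== CLAIM (what is proved, stated in full; the proofs are below) =====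
def Claim_equal_ordered_tracks_py : Prop := ∀ (by_track : List (Option String × Int)) (spec_order : List String), Dom_ordered_tracks_py by_track spec_order → Spec_ordered_tracks_py by_track spec_order (ordered_tracks_py by_track spec_order)

-- ===== LEMMAS AND PROOFS =====

-- proof-side composite rank, used to name the sorted order both ports realise
def pvRank1 (t : Option String) : Nat :=
  if t = none then 2 else if t = some "unknown" then 1 else 0

def pvRank2 (t : Option String) : String := t.getD ""

-- sorted2 with keys into linear orders is sorted with the lexicographic pair key
lemma pv_sorted2_eq_sorted_lex {α κ₁ κ₂ : Type} [LinearOrder κ₁] [LinearOrder κ₂]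
    (xs : List α) (k1 : α → κ₁) (k2 : α → κ₂) :
    PySem.List.sorted2 xs k1 k2 = PySem.List.sorted xs (fun x => toLex (k1 x, k2 x)) := by
  have hbf : (fun a b : α => decide (k1 a < k1 b) || (!decide (k1 b < k1 a) && decide (k2 a < k2 b)))
      = fun a b : α => decide (toLex (k1 a, k2 a) < toLex (k1 b, k2 b)) := by
    funext a b
    rcases lt_trichotomy (k1 a) (k1 b) with h | h | h
    · simp [h, Prod.Lex.lt_iff]
    · simp [h, Prod.Lex.lt_iff]
    · simp [Prod.Lex.lt_iff, h, not_lt_of_gt h, ne_of_gt h]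
  unfold PySem.List.sorted2 PySem.List.sorted
  simp only [Bool.false_eq_true, if_false, hbf]

-- B's rank key equals the (pvRank1, pvRank2) pair
lemma pvKey_eq (t : Option String) : pvKey t = (pvRank1 t, pvRank2 t) := by
  cases t with
  | none => rfl
  | some s =>
    by_cases h : s = "unknown" <;> simp [pvKey, pvRank1, pvRank2, h]

lemma pvKey_injective : Function.Injective pvKey := by
  intro a b hab
  cases a with
  | none =>
    cases b with
    | none => rfl
    | some s =>
      by_cases h : s = "unknown" <;> simp [pvKey, h] at hab
  | some sa =>
    cases b with
    | none => by_cases h : sa = "unknown" <;> simp [pvKey, h] at hab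
    | some sb =>
      by_cases ha : sa = "unknown" <;> by_cases hb : sb = "unknown" <;>
        simp [pvKey, ha, hb] at hab <;> simp [ha, hb, hab]

-- invariant of A's first loop: list and set hold the same elements, never None
lemma pvSpecLoop_aux (by_track : List (Option String × Int)) (spec : List String)
    (o : List (Option String)) (s : PySem.Set (Option String))
    (h : ∀ x, x ∈ o ↔ x ∈ s) (hn : (none : Option String) ∉ o) :
    (∀ x, x ∈ (spec.foldl
        (fun acc tid =>
          if some tid ∈ by_track.map Prod.fst then
            (acc.1 ++ [some tid], PySem.Set.add acc.2 (some tid))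
          else acc) (o, s)).1 ↔ x ∈ (spec.foldl
        (fun acc tid =>
          if some tid ∈ by_track.map Prod.fst then
            (acc.1 ++ [some tid], PySem.Set.add acc.2 (some tid))
          else acc) (o, s)).2)
    ∧ (none : Option String) ∉ (spec.foldl
        (fun acc tid =>
          if some tid ∈ by_track.map Prod.fst then
            (acc.1 ++ [some tid], PySem.Set.add acc.2 (some tid))
          else acc) (o, s)).1 := by
  induction spec generalizing o s with
  | nil => exact ⟨h, hn⟩
  | cons tid rest ih =>
    simp only [List.foldl_cons]
    by_cases hm : some tid ∈ by_track.map Prod.fst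
    · rw [if_pos hm]
      refine ih (o ++ [some tid]) (PySem.Set.add s (some tid)) ?_ ?_
      · intro x
        simp [PySem.Set.mem_add, h x]
      · simp [hn]
    · rw [if_neg hm]
      exact ih o s h hn

lemma pvSpecLoop_inv (by_track : List (Option String × Int)) (spec : List String) :
    (∀ x, x ∈ (pvSpecLoop by_track spec).1 ↔ x ∈ (pvSpecLoop by_track spec).2)
    ∧ (none : Option String) ∉ (pvSpecLoop by_track spec).1 := by
  unfold pvSpecLoop
  exact pvSpecLoop_aux by_track spec [] [] (by simp) (by simp)

-- the first component of A's loop is B's filtered-comprehension prefix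
lemma pvSpecLoop_fst_aux (by_track : List (Option String × Int)) (spec : List String)
    (o : List (Option String)) (s : PySem.Set (Option String)) :
    (spec.foldl
        (fun acc tid =>
          if some tid ∈ by_track.map Prod.fst then
            (acc.1 ++ [some tid], PySem.Set.add acc.2 (some tid))
          else acc) (o, s)).1
      = o ++ (spec.filter (fun tid => some tid ∈ by_track.map Prod.fst)).map
          (fun tid => (some tid : Option String)) := by
  induction spec generalizing o s with
  | nil => simp
  | cons tid rest ih =>
    simp only [List.foldl_cons]
    by_cases hm : some tid ∈ by_track.map Prod.fst
    · rw [if_pos hm, ih]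
      simp [hm]
    · rw [if_neg hm, ih]
      simp [hm]

lemma pvSpecLoop_fst (by_track : List (Option String × Int)) (spec : List String) :
    (pvSpecLoop by_track spec).1
      = (spec.filter (fun tid => some tid ∈ by_track.map Prod.fst)).map
          (fun tid => (some tid : Option String)) := by
  unfold pvSpecLoop
  rw [pvSpecLoop_fst_aux]
  simp

-- a skip-if fold is a fold over the filtered list
lemma pv_foldl_skip_if {α β : Type} (p : α → Bool) (f : β → α → β) (l : List α) (init : β) :
    l.foldl (fun acc x => if p x then acc else f acc x) init
      = (l.filter (fun x => !p x)).foldl f init := by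
  induction l generalizing init with
  | nil => rfl
  | cons x xs ih =>
    by_cases h : p x = true <;> simp [h, ih]

-- a filtered Nodup list is a permutation of: ordinary elements, then "unknown", then None
lemma pv_split_perm (l : List (Option String)) (hl : l.Nodup) (p : Option String → Bool) :
    (l.filter (fun t => p t && !(t == some "unknown") && !(t == none))
      ++ ((if some "unknown" ∈ l ∧ p (some "unknown") = true then [some "unknown"] else [])
        ++ (if (none : Option String) ∈ l ∧ p none = true then [none] else []))).Perm
      (l.filter p) := by
  rw [List.perm_iff_count]
  intro a
  simp only [List.count_append]
  have hcnt : ∀ q : Option String → Bool, (l.filter q).count a = if q a = true ∧ a ∈ l then 1 else 0 := by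
    intro q
    by_cases hq : q a = true
    · rw [List.count_filter hq]
      by_cases hal : a ∈ l
      · simp [hq, hal, List.count_eq_one_of_mem hl hal]
      · simp [hq, hal, List.count_eq_zero_of_not_mem hal]
    · have : a ∉ l.filter q := fun hmem => hq (List.of_mem_filter hmem)
      simp [List.count_eq_zero_of_not_mem this, hq]
  have hone : ∀ (c : Prop) [Decidable c] (b : Option String),
      ((if c then [b] else []) : List (Option String)).count a = if c ∧ a = b then 1 else 0 := by
    intro c _ b
    split_ifs with h1 h2 h3
    · rcases h2 with ⟨_, rfl⟩; simp
    · have : ¬ a = b := fun hab => h2 ⟨h1, hab⟩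
      simp [Ne.symm this]
    · exact absurd h3.1 h1
    · simp
  rw [hcnt, hcnt, hone, hone]
  by_cases hau : a = some "unknown"
  · subst hau
    simp only [beq_self_eq_true, Bool.not_true, Bool.and_false, Bool.false_and, Bool.false_eq_true,
      false_and, if_false, reduceCtorEq]
    by_cases h1 : some "unknown" ∈ l <;> by_cases h2 : p (some "unknown") = true <;>
      simp [h1, h2]
  · by_cases han : a = none
    · subst han
      simp only [beq_self_eq_true, Bool.not_true, Bool.and_false, Bool.false_eq_true, false_and,
        if_false]
      by_cases h1 : (none : Option String) ∈ l <;> by_cases h2 : p none = true <;>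
        simp [h1, h2]
    · have hb1 : (a == some "unknown") = false := by rw [beq_eq_false_iff_ne]; exact hau
      have hb2 : (a == none) = false := by rw [beq_eq_false_iff_ne]; exact han
      simp only [hb1, hb2, Bool.not_false, Bool.and_true, hau, han, and_false, if_false]
      omega

-- the composite-key sort equals A's alphabetical extras sort followed by the two tails
lemma pv_sort_merge (km : List (Option String)) (seen : PySem.Set (Option String))
    (hn : (none : Option String) ∉ seen) :
    PySem.List.sorted2
        ((PySem.List.dedup km).filter (fun t => !PySem.Set.contains seen t)) pvRank1 pvRank2
      = PySem.List.sorted2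
          ((PySem.List.dedup km).filter
            (fun t => !PySem.Set.contains seen t && !(t == some "unknown") && !(t == none)))
          (fun x => if x = none then (1 : Nat) else 0) (fun x => x.getD "")
        ++ ((if some "unknown" ∈ km ∧ some "unknown" ∉ seen then [some "unknown"] else [])
          ++ (if (none : Option String) ∈ km then [none] else [])) := by
  rw [pv_sorted2_eq_sorted_lex, pv_sorted2_eq_sorted_lex]
  set keys := PySem.List.dedup km with hkeys
  set p : Option String → Bool := fun t => !PySem.Set.contains seen t with hp
  set pe : Option String → Bool := fun t => p t && !(t == some "unknown") && !(t == none) with hpe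
  have hcu : (some "unknown" ∈ km ∧ some "unknown" ∉ seen)
      ↔ (some "unknown" ∈ keys ∧ p (some "unknown") = true) := by
    simp [hkeys, hp]
  have hcn : ((none : Option String) ∈ km)
      ↔ ((none : Option String) ∈ keys ∧ p none = true) := by
    simp [hkeys, hp, hn]
  rw [if_congr hcu rfl rfl, if_congr hcn rfl rfl]
  have hmemE : ∀ x ∈ PySem.List.sorted (keys.filter pe)
      (fun x => toLex ((if x = none then (1 : Nat) else 0), x.getD "")),
      p x = true ∧ x ≠ some "unknown" ∧ x ≠ none := by
    intro x hx
    have hx' : x ∈ keys.filter pe :=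
      (PySem.List.sorted_perm (keys.filter pe) _ false).mem_iff.mp hx
    have := List.of_mem_filter hx'
    rw [hpe] at this
    simp only [Bool.and_eq_true, Bool.not_eq_true', beq_eq_false_iff_ne, ne_eq] at this
    exact ⟨this.1.1, this.1.2, this.2⟩
  apply PySem.List.sorted_eq_of_perm_of_pairwise_lt
  · refine List.Perm.trans
      (List.Perm.append_right _ (PySem.List.sorted_perm (keys.filter pe) _ false)) ?_
    exact pv_split_perm keys (hkeys ▸ PySem.List.nodup_dedup km) p
  · rw [List.pairwise_append]
    refine ⟨?_, ?_, ?_⟩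
    · have hle := PySem.List.sorted_pairwise (keys.filter pe)
        (fun x => toLex ((if x = none then (1 : Nat) else 0), x.getD ""))
      have hnd : (PySem.List.sorted (keys.filter pe)
          (fun x => toLex ((if x = none then (1 : Nat) else 0), x.getD ""))).Nodup :=
        (PySem.List.sorted_perm (keys.filter pe) _ false).symm.nodup
          (((hkeys ▸ PySem.List.nodup_dedup km)).filter pe)
      refine (hle.and hnd).imp_of_mem ?_
      intro a b ha hb hab
      obtain ⟨-, hau, han⟩ := hmemE a ha
      obtain ⟨-, hbu, hbn⟩ := hmemE b hb
      obtain ⟨sa, rfl⟩ := Option.ne_none_iff_exists'.mp han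
      obtain ⟨sb, rfl⟩ := Option.ne_none_iff_exists'.mp hbn
      have hk : ∀ s : String, some s ≠ some "unknown" →
          toLex ((pvRank1 (some s) : Nat), pvRank2 (some s)) = toLex ((0 : Nat), s) := by
        intro s hsu
        simp [pvRank1, pvRank2, hsu]
      rw [hk sa hau, hk sb hbu]
      have h1 : toLex ((0 : Nat), sa) ≤ toLex ((0 : Nat), sb) := by
        simpa using hab.1
      refine lt_of_le_of_ne h1 ?_
      intro hcontra
      rw [toLex_inj, Prod.mk.injEq] at hcontra
      exact hab.2 (by rw [hcontra.2])
    · rw [List.pairwise_append]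
      refine ⟨by split_ifs <;> simp, by split_ifs <;> simp, ?_⟩
      intro a ha b hb
      rw [List.mem_ite_nil_right] at ha hb
      have ha' := List.mem_singleton.mp ha.2
      have hb' := List.mem_singleton.mp hb.2
      subst ha'; subst hb'
      simp [pvRank1, pvRank2, Prod.Lex.lt_iff]
    · intro a ha b hb
      obtain ⟨-, hau, han⟩ := hmemE a ha
      have hra : pvRank1 a = 0 := by simp [pvRank1, hau, han]
      have hrb : pvRank1 b = 1 ∨ pvRank1 b = 2 := by
        rcases List.mem_append.mp hb with hb | hb <;> rw [List.mem_ite_nil_right] at hb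
        · rw [List.mem_singleton.mp hb.2]; left; simp [pvRank1]
        · rw [List.mem_singleton.mp hb.2]; right; simp [pvRank1]
      rw [Prod.Lex.lt_iff]
      left
      simp only [ofLex_toLex]
      rcases hrb with h | h <;> rw [hra, h] <;> omega

-- A's result named: prefix, then ONE composite-rank sort of the unseen keys
lemma pvA_eq (bt : List (Option String × Int)) (spec : List String) :
    ordered_tracks_py bt spec
      = (pvSpecLoop bt spec).1
        ++ PySem.List.sorted2
            ((PySem.List.dedup (bt.map Prod.fst)).filter
              (fun t => !PySem.Set.contains (pvSpecLoop bt spec).2 t))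
            pvRank1 pvRank2 := by
  unfold ordered_tracks_py
  obtain ⟨hmem, hnone⟩ := pvSpecLoop_inv bt spec
  set st := pvSpecLoop bt spec with hst
  have hnone_seen : (none : Option String) ∉ st.2 := fun h => hnone ((hmem none).mpr h)
  set km := bt.map Prod.fst with hkm
  set E := PySem.List.sorted2
    ((PySem.List.dedup km).filter
      (fun t => !PySem.Set.contains st.2 t && !(t == some "unknown") && !(t == none)))
    (fun x => if x = none then (1 : Nat) else 0) (fun x => x.getD "") with hE
  have hmemE : ∀ x ∈ E, x ≠ some "unknown" ∧ x ≠ none := by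
    intro x hx
    have hx' := (PySem.List.sorted2_perm _ _ _ false).mem_iff.mp (hE ▸ hx)
    have := List.of_mem_filter hx'
    simp only [Bool.and_eq_true, Bool.not_eq_true', beq_eq_false_iff_ne, ne_eq] at this
    exact ⟨this.1.2, this.2⟩
  simp only [List.foldl_cons, List.foldl_nil]
  have hcond1 : (some "unknown" ∈ km ∧ some "unknown" ∉ st.1 ++ E)
      ↔ (some "unknown" ∈ km ∧ some "unknown" ∉ st.2) := by
    constructor
    · rintro ⟨h1, h2⟩
      exact ⟨h1, fun hs => h2 (List.mem_append.mpr (Or.inl ((hmem _).mpr hs)))⟩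
    · rintro ⟨h1, h2⟩
      refine ⟨h1, fun hmem' => ?_⟩
      rcases List.mem_append.mp hmem' with h | h
      · exact h2 ((hmem _).mp h)
      · exact (hmemE _ h).1 rfl
  rw [pv_sort_merge km st.2 hnone_seen, ← hE, if_congr hcond1 rfl rfl]
  by_cases c1 : some "unknown" ∈ km ∧ some "unknown" ∉ st.2
  · rw [if_pos c1]
    have hnone_o1 : (none : Option String) ∉ (st.1 ++ E) ++ [some "unknown"] := by
      intro h
      rcases List.mem_append.mp h with h | h
      · rcases List.mem_append.mp h with h | h
        · exact hnone h
        · exact (hmemE _ h).2 rfl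
      · simp at h
    have hcond2 : ((none : Option String) ∈ km ∧ (none : Option String) ∉ (st.1 ++ E) ++ [some "unknown"])
        ↔ (none : Option String) ∈ km := ⟨fun h => h.1, fun h => ⟨h, hnone_o1⟩⟩
    rw [if_congr hcond2 rfl rfl]
    by_cases c2 : (none : Option String) ∈ km
    · rw [if_pos c2, if_pos c2]
      simp [List.append_assoc, c1]
    · rw [if_neg c2, if_neg c2]
      simp [List.append_assoc, c1]
  · rw [if_neg c1]
    have hnone_o1 : (none : Option String) ∉ st.1 ++ E := by
      intro h
      rcases List.mem_append.mp h with h | h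
      · exact hnone h
      · exact (hmemE _ h).2 rfl
    have hcond2 : ((none : Option String) ∈ km ∧ (none : Option String) ∉ st.1 ++ E)
        ↔ (none : Option String) ∈ km := ⟨fun h => h.1, fun h => ⟨h, hnone_o1⟩⟩
    rw [if_congr hcond2 rfl rfl]
    by_cases c2 : (none : Option String) ∈ km
    · rw [if_pos c2, if_pos c2]
      simp [List.append_assoc, c1]
    · rw [if_neg c2, if_neg c2]
      simp [c1]

-- inserting a fresh key keeps the tail strictly increasing and adds (k, t)
lemma pvInsertTail_perm (tl : List ((Nat × String) × Option String)) (k : Nat × String)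
    (t : Option String) : (pvInsertTail tl k t).Perm ((k, t) :: tl) := by
  induction tl with
  | nil => simp [pvInsertTail]
  | cons x rest ih =>
    unfold pvInsertTail
    by_cases h : toLex x.1 < toLex k
    · rw [if_pos h]
      exact (ih.cons x).trans (List.Perm.swap _ _ _)
    · rw [if_neg h]

lemma pvInsertTail_pairwise (tl : List ((Nat × String) × Option String)) (k : Nat × String)
    (t : Option String)
    (hp : tl.Pairwise (fun a b => toLex a.1 < toLex b.1))
    (hne : ∀ x ∈ tl, toLex x.1 ≠ toLex k) :
    (pvInsertTail tl k t).Pairwise (fun a b => toLex a.1 < toLex b.1) := by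
  induction tl with
  | nil => simp [pvInsertTail]
  | cons x rest ih =>
    have hx1 : ∀ y ∈ rest, toLex x.1 < toLex y.1 := (List.pairwise_cons.mp hp).1
    have hrest : rest.Pairwise (fun a b => toLex a.1 < toLex b.1) := (List.pairwise_cons.mp hp).2
    unfold pvInsertTail
    by_cases h : toLex x.1 < toLex k
    · rw [if_pos h, List.pairwise_cons]
      constructor
      · intro y hy
        rcases List.mem_cons.mp ((pvInsertTail_perm rest k t).mem_iff.mp hy) with hy | hy
        · rw [hy]; exact h
        · exact hx1 y hy
      · exact ih hrest (fun y hy => hne y (List.mem_cons_of_mem x hy))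
    · rw [if_neg h, List.pairwise_cons]
      have hk : toLex k < toLex x.1 :=
        lt_of_le_of_ne (not_lt.mp h) (Ne.symm (hne x (by simp)))
      refine ⟨?_, hp⟩
      intro y hy
      rcases List.mem_cons.mp hy with hy | hy
      · rw [hy]; exact hk
      · exact hk.trans (hx1 y hy)

-- the insertion fold over distinct-key elements: a strictly increasing permutation
lemma pvFold_aux (L : List (Option String)) (tl : List ((Nat × String) × Option String))
    (hp : tl.Pairwise (fun a b => toLex a.1 < toLex b.1))
    (hdisj : ∀ x ∈ tl, ∀ t ∈ L, toLex x.1 ≠ toLex (pvKey t))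
    (hLnd : (L.map (fun t => toLex (pvKey t))).Nodup) :
    (L.foldl (fun tl t => pvInsertTail tl (pvKey t) t) tl).Perm
        (tl ++ L.map (fun t => (pvKey t, t)))
      ∧ (L.foldl (fun tl t => pvInsertTail tl (pvKey t) t) tl).Pairwise
          (fun a b => toLex a.1 < toLex b.1) := by
  induction L generalizing tl with
  | nil => exact ⟨by simp, hp⟩
  | cons t L' ih =>
    simp only [List.foldl_cons]
    rw [List.map_cons, List.nodup_cons] at hLnd
    have hne : ∀ x ∈ tl, toLex x.1 ≠ toLex (pvKey t) :=
      fun x hx => hdisj x hx t (by simp)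
    have hp' := pvInsertTail_pairwise tl (pvKey t) t hp hne
    have hdisj' : ∀ x ∈ pvInsertTail tl (pvKey t) t, ∀ u ∈ L', toLex x.1 ≠ toLex (pvKey u) := by
      intro x hx u hu
      rcases List.mem_cons.mp ((pvInsertTail_perm tl (pvKey t) t).mem_iff.mp hx) with hx | hx
      · rw [hx]
        intro hcontra
        apply hLnd.1
        have h2 : toLex (pvKey t) = toLex (pvKey u) := hcontra
        rw [h2]
        exact List.mem_map_of_mem hu
      · exact hdisj x hx u (List.mem_cons_of_mem t hu)
    obtain ⟨hperm, hpw⟩ := ih (pvInsertTail tl (pvKey t) t) hp' hdisj' hLnd.2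
    refine ⟨?_, hpw⟩
    refine hperm.trans ?_
    refine (List.Perm.append_right _ (pvInsertTail_perm tl (pvKey t) t)).trans ?_
    simp only [List.map_cons, List.cons_append]
    exact (List.perm_middle).symm

-- ===== VERDICT (by name: the statement is the Claim_ definition above) =====
theorem ordered_tracks_py_spec : Claim_equal_ordered_tracks_py := by
  intro bt spec _hdom
  unfold Spec_ordered_tracks_py
  rw [pvA_eq]
  simp only [ordered_tracks_py_alt]
  obtain ⟨hmem, _hnone⟩ := pvSpecLoop_inv bt spec
  set st := pvSpecLoop bt spec with hst
  set km := bt.map Prod.fst with hkm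
  -- B's prefix is A's loop prefix
  have hpre : (spec.filter (fun tid => some tid ∈ km)).map (fun tid => (some tid : Option String))
      = st.1 := (pvSpecLoop_fst bt spec).symm
  rw [hpre]
  -- B's seen set tests the same membership as A's
  have hseen : ∀ t : Option String,
      PySem.Set.contains (PySem.Set.ofList st.1) t = PySem.Set.contains st.2 t := by
    intro t
    rw [Bool.eq_iff_iff, PySem.Set.contains_iff, PySem.Set.contains_iff, PySem.Set.mem_ofList]
    exact hmem t
  -- B's skip-if fold is the insertion fold over the filtered keys
  rw [pv_foldl_skip_if (fun t => PySem.Set.contains (PySem.Set.ofList st.1) t)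
    (fun tl t => pvInsertTail tl (pvKey t) t)]
  have hfilter : (PySem.List.dedup km).filter
        (fun t => !PySem.Set.contains (PySem.Set.ofList st.1) t)
      = (PySem.List.dedup km).filter (fun t => !PySem.Set.contains st.2 t) := by
    apply List.filter_congr
    intro t _
    rw [hseen t]
  rw [hfilter]
  set L := (PySem.List.dedup km).filter (fun t => !PySem.Set.contains st.2 t) with hL
  have hLnodup : L.Nodup := (PySem.List.nodup_dedup km).filter _
  have hLnd : (L.map (fun t => toLex (pvKey t))).Nodup :=
    hLnodup.map (fun a b hab => pvKey_injective (toLex_inj.mp hab))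
  obtain ⟨hperm, hpw⟩ := pvFold_aux L [] (by simp) (by simp) hLnd
  rw [List.nil_append] at hperm
  -- every element of the fold result pairs a key with its rank
  have hshape : ∀ x ∈ L.foldl (fun tl t => pvInsertTail tl (pvKey t) t) [], x.1 = pvKey x.2 := by
    intro x hx
    have := hperm.mem_iff.mp hx
    obtain ⟨t, _, rfl⟩ := List.mem_map.mp this
    rfl
  congr 1
  -- the mapped-snd fold result IS the sorted2 order of L
  rw [pv_sorted2_eq_sorted_lex]
  apply PySem.List.sorted_eq_of_perm_of_pairwise_lt
  · have h3 := hperm.map Prod.snd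
    rw [List.map_map] at h3
    have h4 : (List.map (Prod.snd ∘ fun t => (pvKey t, t)) L) = L := by
      simp [Function.comp_def]
    rw [h4] at h3
    exact h3
  · rw [List.pairwise_map]
    refine hpw.imp_of_mem ?_
    intro a b ha hb hab
    rw [← pvKey_eq, ← pvKey_eq, ← hshape a ha, ← hshape b hb]
    exact hab
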